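-- pv_equiv track=rewrite | github.com/ts-31/pocketpaw | installer/launcher/bootstrap.py | _format_pip_error
-- ===== SOURCE A (Python) =====
-- def _format_pip_error(stderr: str) -> str:
--     """Extract a short, actionable message from pip/uv stderr output."""
--     for marker in ("ERROR:", "error:", "×"):
--         for line in stderr.splitlines():
--             stripped = line.strip()
--             if stripped.startswith(marker):
--                 return f"Install failed: {stripped}"
--
--     return (
--         "Failed to install pocketpaw. "
--         "Check the log at ~/.pocketclaw/logs/launcher.log for details."
--     )
-- ===== SOURCE B (Python) =====
-- def _format_pip_error(stderr: str) -> str: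
--     """Extract a short, actionable message from pip/uv stderr output."""
--     first_upper = first_lower = first_cross = None
--     for line in stderr.splitlines():
--         s = line.strip()
--         if first_upper is None and s.startswith("ERROR:"):
--             first_upper = s
--         if first_lower is None and s.startswith("error:"):
--             first_lower = s
--         if first_cross is None and s.startswith("×"):
--             first_cross = s
--     for hit in (first_upper, first_lower, first_cross):
--         if hit is not None:
--             return f"Install failed: {hit}"
--     return (
--         "Failed to install pocketpaw. "
--         "Check the log at ~/.pocketclaw/logs/launcher.log for details."
--     )
-- ===== Notes on version B (the rewrite author's own statement) =====
-- stated objective: alternative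
-- what changed: One pass over the lines recording the first matching stripped line per marker in three accumulators, then a priority select, instead of rescanning all lines once per marker.
import Mathlib
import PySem

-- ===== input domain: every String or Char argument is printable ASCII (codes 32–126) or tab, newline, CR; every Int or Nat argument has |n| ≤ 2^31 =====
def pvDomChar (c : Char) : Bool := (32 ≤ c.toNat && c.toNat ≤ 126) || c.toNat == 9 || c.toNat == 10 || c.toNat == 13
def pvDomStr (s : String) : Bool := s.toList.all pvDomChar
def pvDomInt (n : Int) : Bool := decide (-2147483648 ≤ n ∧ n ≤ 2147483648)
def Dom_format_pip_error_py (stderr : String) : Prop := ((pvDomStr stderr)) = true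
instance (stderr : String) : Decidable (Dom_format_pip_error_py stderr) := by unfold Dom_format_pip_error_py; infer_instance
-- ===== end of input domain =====

-- B replaces A's marker-by-marker rescans by one pass that records the first match per
-- marker in three accumulators, then selects in priority order (same return value).

-- ===== PORT A =====
-- inner 'for line in stderr.splitlines()' loop of A, for one marker
def aFind (marker : String) : List String → Option String
  | [] => none
  | line :: rest =>
    let stripped := PySem.Str.strip line
    if PySem.Str.startswith stripped marker then some ("Install failed: " ++ stripped)
    else aFind marker rest

-- outer 'for marker in (...)' loop of A
def aOuter (lines : List String) : List String → Option String
  | [] => none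
  | m :: ms =>
    match aFind m lines with
    | some r => some r
    | none => aOuter lines ms

def format_pip_error_py (stderr : String) : String :=
  match aOuter (PySem.Str.splitlines stderr) ["ERROR:", "error:", "×"] with
  | some r => r
  | none =>
    "Failed to install pocketpaw. Check the log at ~/.pocketclaw/logs/launcher.log for details."

-- ===== PORT B =====
-- one step of B's single pass: fill each still-empty accumulator on its marker
def bStep (st : Option String × Option String × Option String) (line : String) :
    Option String × Option String × Option String :=
  let s := PySem.Str.strip line
  let u := if st.1.isNone && PySem.Str.startswith s "ERROR:" then some s else st.1
  let l := if st.2.1.isNone && PySem.Str.startswith s "error:" then some s else st.2.1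
  let c := if st.2.2.isNone && PySem.Str.startswith s "×" then some s else st.2.2
  (u, l, c)

def format_pip_error_py_alt (stderr : String) : String :=
  let st := (PySem.Str.splitlines stderr).foldl bStep (none, none, none)
  match st.1 with
  | some hit => "Install failed: " ++ hit
  | none =>
  match st.2.1 with
  | some hit => "Install failed: " ++ hit
  | none =>
  match st.2.2 with
  | some hit => "Install failed: " ++ hit
  | none =>
    "Failed to install pocketpaw. Check the log at ~/.pocketclaw/logs/launcher.log for details."

-- ===== PRECONDITION & SPEC =====
def Spec_format_pip_error_py (stderr : String) (out : String) : Prop := out = format_pip_error_py_alt stderr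
instance (stderr : String) (out : String) : Decidable (Spec_format_pip_error_py stderr out) := by unfold Spec_format_pip_error_py; infer_instance

-- ===== CLAIM (what is proved, stated in full; the proofs are below) =====
def Claim_equal_format_pip_error_py : Prop := ∀ (stderr : String), Dom_format_pip_error_py stderr → Spec_format_pip_error_py stderr (format_pip_error_py stderr)

-- ===== LEMMAS AND PROOFS =====

-- first stripped line starting with a given marker (the value both programs are after)
def firstHit (marker : String) : List String → Option String
  | [] => none
  | line :: rest =>
    let s := PySem.Str.strip line
    if PySem.Str.startswith s marker then some s else firstHit marker rest

theorem aFind_eq (marker : String) (lines : List String) :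
    aFind marker lines = (firstHit marker lines).map (fun s => "Install failed: " ++ s) := by
  induction lines with
  | nil => rfl
  | cons l ls ih =>
    simp only [aFind, firstHit]
    split <;> simp [ih]

theorem fold_fst (lines : List String) (u l c : Option String) :
    ((lines.foldl bStep (u, l, c)).1) =
      (match u with | some x => some x | none => firstHit "ERROR:" lines) := by
  induction lines generalizing u l c with
  | nil => cases u <;> rfl
  | cons x xs ih =>
    simp only [List.foldl, bStep]
    rw [ih]
    cases u with
    | some w => simp
    | none =>
      simp only [firstHit]
      by_cases h : PySem.Chars.startswith (PySem.Chars.strip x.toList) ['E','R','R','O','R',':'] = true <;>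
        simp [h]

theorem fold_snd (lines : List String) (u l c : Option String) :
    ((lines.foldl bStep (u, l, c)).2.1) =
      (match l with | some x => some x | none => firstHit "error:" lines) := by
  induction lines generalizing u l c with
  | nil => cases l <;> rfl
  | cons x xs ih =>
    simp only [List.foldl, bStep]
    rw [ih]
    cases l with
    | some w => simp
    | none =>
      simp only [firstHit]
      by_cases h : PySem.Chars.startswith (PySem.Chars.strip x.toList) ['e','r','r','o','r',':'] = true <;>
        simp [h]

theorem fold_trd (lines : List String) (u l c : Option String) :
    ((lines.foldl bStep (u, l, c)).2.2) =
      (match c with | some x => some x | none => firstHit "×" lines) := by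
  induction lines generalizing u l c with
  | nil => cases c <;> rfl
  | cons x xs ih =>
    simp only [List.foldl, bStep]
    rw [ih]
    cases c with
    | some w => simp
    | none =>
      simp only [firstHit]
      by_cases h : PySem.Chars.startswith (PySem.Chars.strip x.toList) ['×'] = true <;>
        simp [h]

-- ===== VERDICT (by name: the statement is the Claim_ definition above) =====
theorem format_pip_error_py_spec : Claim_equal_format_pip_error_py := by
  intro stderr _
  unfold Spec_format_pip_error_py format_pip_error_py format_pip_error_py_alt
  simp only [aOuter, aFind_eq, fold_fst, fold_snd, fold_trd]
  cases firstHit "ERROR:" (PySem.Str.splitlines stderr) <;>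
    cases firstHit "error:" (PySem.Str.splitlines stderr) <;>
      cases firstHit "×" (PySem.Str.splitlines stderr) <;> simp
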